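-- pv_equiv track=rewrite | github.com/teshchaudhary/Practice_DSA | Is_Binary_Number_Multiple_of_3.py | isDivisible
-- ===== SOURCE A (Python) =====
-- def isDivisible(s):
-- 	   evenPos = oddPos = 0
--
-- 	   for i in range(len(s)):
-- 	       if s[i] == '1':
-- 	           if i & 1 == 1:
-- 	               evenPos += 1
--
-- 	           else:
-- 	               oddPos += 1
--
-- 	   return 1 if abs(evenPos - oddPos) % 3 == 0 else 0
-- ===== SOURCE B (Python) =====
-- def isDivisible(s):
--     rem = 0
--     for c in s:
--         rem = (rem * 2 + (1 if c == '1' else 0)) % 3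
--     return 1 if rem == 0 else 0
-- ===== Notes on version B (the rewrite author's own statement) =====
-- stated objective: simpler
-- what changed: Replaced the even/odd-position bit-count plus abs-difference test with a single running remainder mod 3 (DFA) updated as rem = (rem*2 + bit) % 3 over the characters.
import Mathlib
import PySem

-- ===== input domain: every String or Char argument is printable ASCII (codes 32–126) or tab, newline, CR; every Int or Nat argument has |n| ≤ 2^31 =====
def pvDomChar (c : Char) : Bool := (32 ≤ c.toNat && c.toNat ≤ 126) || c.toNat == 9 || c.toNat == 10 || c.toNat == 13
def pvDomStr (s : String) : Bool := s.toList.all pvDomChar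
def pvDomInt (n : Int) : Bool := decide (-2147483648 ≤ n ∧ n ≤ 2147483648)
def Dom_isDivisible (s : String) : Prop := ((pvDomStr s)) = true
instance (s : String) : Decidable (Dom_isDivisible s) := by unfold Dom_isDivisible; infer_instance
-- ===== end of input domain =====

-- B replaces A's even/odd-position bit counting with a single running remainder mod 3 (simpler).

-- ===== PORT A =====
-- literal port: loop over i in range(len(s)), count '1's at odd (i & 1 == 1) and even
-- positions; 'i & 1 == 1' is ported as 'i % 2 = 1', exact since the loop index is nonnegative.
def isDivisible (s : String) : Int :=
  let st := (PySem.List.pyRange 0 (PySem.Str.len s) 1).foldl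
    (fun (ac : Int × Int) i =>
      if PySem.Str.pyGet? s i = some '1' then
        if i % 2 = 1 then (ac.1 + 1, ac.2) else (ac.1, ac.2 + 1)
      else ac) (0, 0)
  if PySem.Int.mod |st.1 - st.2| 3 = 0 then 1 else 0

-- ===== PORT B =====
def isDivisible_alt (s : String) : Int :=
  let rem := s.toList.foldl
    (fun (r : Int) c => PySem.Int.mod (r * 2 + (if c = '1' then 1 else 0)) 3) 0
  if rem = 0 then 1 else 0

-- ===== PRECONDITION & SPEC =====
def Spec_isDivisible (s : String) (out : Int) : Prop := out = isDivisible_alt s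
instance (s : String) (out : Int) : Decidable (Spec_isDivisible s out) := by unfold Spec_isDivisible; infer_instance

-- ===== CLAIM (what is proved, stated in full; the proofs are below) =====
def Claim_equal_isDivisible : Prop := ∀ (s : String), Dom_isDivisible s → Spec_isDivisible s (isDivisible s)

-- ===== LEMMAS AND PROOFS =====

-- A's fold, phrased over the character list
def pvAfold (cs : List Char) : Int × Int :=
  (PySem.List.pyRange 0 cs.length 1).foldl
    (fun (ac : Int × Int) i =>
      if PySem.List.pyGet? cs i = some '1' then
        if i % 2 = 1 then (ac.1 + 1, ac.2) else (ac.1, ac.2 + 1)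
      else ac) (0, 0)

-- B's fold, over the character list
def pvBfold (cs : List Char) : Int :=
  cs.foldl (fun (r : Int) c => PySem.Int.mod (r * 2 + (if c = '1' then 1 else 0)) 3) 0

lemma pvMod3 (x : Int) : PySem.Int.mod x 3 = x % 3 := by
  simp [PySem.Int.mod, Int.fmod_eq_emod_of_nonneg]

lemma pvAfold_general (cs : List Char) (c : Char) (ac : Int × Int) :
    (PySem.List.pyRange 0 ((cs.length : Int) + 1) 1).foldl
      (fun (ac : Int × Int) i =>
        if PySem.List.pyGet? (cs ++ [c]) i = some '1' then
          if i % 2 = 1 then (ac.1 + 1, ac.2) else (ac.1, ac.2 + 1)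
        else ac) ac
  = (fun (ac : Int × Int) i =>
        if PySem.List.pyGet? (cs ++ [c]) i = some '1' then
          if i % 2 = 1 then (ac.1 + 1, ac.2) else (ac.1, ac.2 + 1)
        else ac)
      ((PySem.List.pyRange 0 (cs.length : Int) 1).foldl
        (fun (ac : Int × Int) i =>
          if PySem.List.pyGet? cs i = some '1' then
            if i % 2 = 1 then (ac.1 + 1, ac.2) else (ac.1, ac.2 + 1)
          else ac) ac)
      (cs.length : Int) := by
  have h : List.foldl
      (fun (ac : Int × Int) i =>
        if PySem.List.pyGet? (cs ++ [c]) i = some '1' then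
          if i % 2 = 1 then (ac.1 + 1, ac.2) else (ac.1, ac.2 + 1)
        else ac) ac (PySem.List.pyRange 0 (cs.length : Int) 1)
      = List.foldl
      (fun (ac : Int × Int) i =>
        if PySem.List.pyGet? cs i = some '1' then
          if i % 2 = 1 then (ac.1 + 1, ac.2) else (ac.1, ac.2 + 1)
        else ac) ac (PySem.List.pyRange 0 (cs.length : Int) 1) := by
    apply PySem.List.foldl_congr_mem
    intro acc i hi
    rw [PySem.List.mem_pyRange_one] at hi
    rw [PySem.List.pyGet?_of_nonneg _ hi.1, PySem.List.pyGet?_of_nonneg _ hi.1,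
      List.getElem?_append_left (by omega)]
  rw [PySem.List.pyRange_one_succ_right (by positivity), List.foldl_append, h]
  simp only [List.foldl_cons, List.foldl_nil]

lemma pvKey (cs : List Char) :
    0 ≤ pvBfold cs ∧ pvBfold cs < 3 ∧
    (cs.length % 2 = 0 → (3:Int) ∣ (pvBfold cs + ((pvAfold cs).2 - (pvAfold cs).1))) ∧
    (cs.length % 2 = 1 → (3:Int) ∣ (pvBfold cs - ((pvAfold cs).2 - (pvAfold cs).1))) := by
  induction cs using List.reverseRecOn with
  | nil => simp [pvBfold, pvAfold, PySem.List.pyRange]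
  | append_singleton cs c ih =>
    obtain ⟨hb0, hb3, heven, hodd⟩ := ih
    have hB : pvBfold (cs ++ [c]) =
        PySem.Int.mod (pvBfold cs * 2 + (if c = '1' then 1 else 0)) 3 := by
      simp [pvBfold, List.foldl_append]
    have hA : pvAfold (cs ++ [c]) =
        (fun (ac : Int × Int) i =>
          if PySem.List.pyGet? (cs ++ [c]) i = some '1' then
            if i % 2 = 1 then (ac.1 + 1, ac.2) else (ac.1, ac.2 + 1)
          else ac) (pvAfold cs) (cs.length : Int) := by
      unfold pvAfold
      rw [show ((cs ++ [c]).length : Int) = (cs.length : Int) + 1 by simp]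
      exact pvAfold_general cs c (0, 0)
    have hlast : PySem.List.pyGet? (cs ++ [c]) (cs.length : Int) = some c := by
      exact PySem.List.pyGet?_append_length (pre:=cs) (y:=c) (ys:=[])
    have hlen2 : (cs ++ [c]).length = cs.length + 1 := by simp
    rw [hB, hA, hlen2]
    simp only [hlast, Option.some.injEq, pvMod3]
    have hcase : cs.length % 2 = 0 ∨ cs.length % 2 = 1 := by omega
    rcases hcase with hp | hp
    · have hd := heven hp
      split_ifs <;> refine ⟨by omega, by omega, fun h => by omega, fun h => by omega⟩
    · have hd := hodd hp
      split_ifs <;> refine ⟨by omega, by omega, fun h => by omega, fun h => by omega⟩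

lemma pvA_eq (s : String) :
    isDivisible s = if PySem.Int.mod |(pvAfold s.toList).1 - (pvAfold s.toList).2| 3 = 0 then 1 else 0 := by
  unfold isDivisible pvAfold
  rw [show PySem.Str.len s = (s.toList.length : Int) from PySem.Str.len_eq s]
  rfl

lemma pvB_eq (s : String) :
    isDivisible_alt s = if pvBfold s.toList = 0 then 1 else 0 := rfl

-- ===== VERDICT (by name: the statement is the Claim_ definition above) =====
theorem isDivisible_spec : Claim_equal_isDivisible := by
  unfold Claim_equal_isDivisible Spec_isDivisible
  intro s _
  rw [pvA_eq, pvB_eq]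
  obtain ⟨hb0, hb3, heven, hodd⟩ := pvKey s.toList
  simp only [pvMod3]
  obtain ⟨ha, -⟩ | ⟨ha, -⟩ := abs_cases ((pvAfold s.toList).1 - (pvAfold s.toList).2) <;>
    rw [ha] <;>
    (have hcase : s.toList.length % 2 = 0 ∨ s.toList.length % 2 = 1 := by omega) <;>
    rcases hcase with hp | hp
  · have hd := heven hp; split_ifs <;> omega
  · have hd := hodd hp; split_ifs <;> omega
  · have hd := heven hp; split_ifs <;> omega
  · have hd := hodd hp; split_ifs <;> omega
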